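-- pv_equiv track=rewrite | github.com/nemesmarci/Advent-of-Code-2015 | 5/5_1.py | is_nice
-- ===== SOURCE A (Python) =====
-- vowels = [v for v in "aeiou"]
--
-- bads = ["ab", "cd", "pq", "xy"]
--
-- def is_nice(line):
--     if len([c for c in line if c in vowels]) < 3:
--         return 0
--     double = False
--     for i in range(len(line) - 1):
--         if line[i] == line[i + 1]:
--             double = True
--             break
--     if not double:
--         return 0
--     for b in bads:
--         if b in line:
--             return 0
--     return 1
-- ===== SOURCE B (Python) =====
-- def is_nice(line):
--     # single fused pass: a small state machine carrying the previous character
--     vowels = 0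
--     double = False
--     bad = False
--     prev = None
--     for c in line:
--         if c in "aeiou":
--             vowels += 1
--         if prev is not None:
--             if prev == c:
--                 double = True
--             if prev + c in ("ab", "cd", "pq", "xy"):
--                 bad = True
--         prev = c
--     return 1 if vowels >= 3 and double and not bad else 0
-- ===== Notes on version B (the rewrite author's own statement) =====
-- stated objective: alternative
-- what changed: B replaces A's three staged scans with early returns (filter+len for vowels, an index loop for the double, a substring search per forbidden pair) by one fused left-to-right pass: a state machine holding the previous character and three accumulators (vowel count, double flag, bad-pair flag), deciding at the end.
import Mathlib
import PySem

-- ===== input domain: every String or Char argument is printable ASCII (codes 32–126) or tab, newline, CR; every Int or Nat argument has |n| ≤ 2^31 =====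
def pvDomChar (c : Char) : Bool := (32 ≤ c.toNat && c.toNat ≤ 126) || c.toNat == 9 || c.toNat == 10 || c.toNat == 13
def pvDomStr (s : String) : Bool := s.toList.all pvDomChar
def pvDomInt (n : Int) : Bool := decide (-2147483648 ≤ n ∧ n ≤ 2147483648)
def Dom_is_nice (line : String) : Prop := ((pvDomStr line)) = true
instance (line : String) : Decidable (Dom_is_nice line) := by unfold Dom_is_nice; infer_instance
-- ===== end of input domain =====

-- B replaces A's three staged scans with early returns by one fused left-to-right pass:
-- a state machine holding the previous character and three accumulators (vowel count,
-- double flag, bad-pair flag); objective: alternative decomposition, same O(n) cost.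

-- ===== PORT A =====
-- vowels = [v for v in "aeiou"]
def pvVowels : List Char := "aeiou".toList
-- bads = ["ab", "cd", "pq", "xy"]
def pvBads : List String := ["ab", "cd", "pq", "xy"]

-- 'for i in range(len(line)-1): if line[i] == line[i+1]: double = True; break'
def pvDoubleLoop (cs : List Char) : List Int → Bool
  | [] => false
  | i :: rest =>
      if PySem.List.pyGet? cs i = PySem.List.pyGet? cs (i + 1) then true
      else pvDoubleLoop cs rest

-- 'for b in bads: if b in line: return 0' then 'return 1'
def pvBadsLoop (line : String) : List String → Int
  | [] => 1
  | b :: rest => if PySem.Str.isIn b line then 0 else pvBadsLoop line rest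

def is_nice (line : String) : Int :=
  if ((line.toList.filter (fun c => decide (c ∈ pvVowels))).length : Int) < 3 then 0
  else
    let double := pvDoubleLoop line.toList
      (PySem.List.pyRange 0 ((line.toList.length : Int) - 1) 1)
    if double = false then 0
    else pvBadsLoop line pvBads

-- ===== PORT B =====
-- one step of B's loop body; state = (prev, vowels, double, bad)
def pvStep (st : Option Char × Int × Bool × Bool) (c : Char) :
    Option Char × Int × Bool × Bool :=
  let v := if c ∈ "aeiou".toList then st.2.1 + 1 else st.2.1
  match st.1 with
  | none => (some c, v, st.2.2.1, st.2.2.2)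
  | some p =>
      (some c, v,
        (if p = c then true else st.2.2.1),
        (if String.ofList [p, c] ∈ pvBads then true else st.2.2.2))

def is_nice_alt (line : String) : Int :=
  let st := line.toList.foldl pvStep (none, 0, false, false)
  if 3 ≤ st.2.1 ∧ st.2.2.1 = true ∧ ¬(st.2.2.2 = true) then 1 else 0

-- ===== PRECONDITION & SPEC =====
def Spec_is_nice (line : String) (out : Int) : Prop := out = is_nice_alt line
instance (line : String) (out : Int) : Decidable (Spec_is_nice line out) := by unfold Spec_is_nice; infer_instance

-- ===== CLAIM (what is proved, stated in full; the proofs are below) =====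
def Claim_equal_is_nice : Prop := ∀ (line : String), Dom_is_nice line → Spec_is_nice line (is_nice line)

-- ===== LEMMAS AND PROOFS =====

-- 'some adjacent pair of cs satisfies f', the structural form both versions reduce to
def pvAdj (f : Char → Char → Bool) : List Char → Bool
  | a :: b :: t => f a b || pvAdj f (b :: t)
  | _ => false

theorem pvAdj_cons2 (f : Char → Char → Bool) (a b : Char) (t : List Char) :
    pvAdj f (a :: b :: t) = (f a b || pvAdj f (b :: t)) := rfl

theorem pvAdj_short (f : Char → Char → Bool) (l : List Char) (h : l.length ≤ 1) :
    pvAdj f l = false := by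
  match l with
  | [] => rfl
  | [_] => rfl
  | _ :: _ :: _ => simp at h

-- vowel count as an Int-valued countP
def pvVc (cs : List Char) : Int := (cs.countP (fun c => decide (c ∈ "aeiou".toList)) : Int)

def pvBadf (p c : Char) : Bool := decide (String.ofList [p, c] ∈ pvBads)

-- invariant of B's fused loop, started after having seen 'p'
theorem pv_fold (cs : List Char) (p : Char) (v : Int) (d b : Bool) :
    (cs.foldl pvStep (some p, v, d, b)).2
      = (v + pvVc cs, d || pvAdj (fun x y => x == y) (p :: cs),
          b || pvAdj pvBadf (p :: cs)) := by
  induction cs generalizing p v d b with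
  | nil => simp [pvVc, pvAdj_short]
  | cons c t ih =>
      rw [List.foldl_cons]
      show (t.foldl pvStep (some c, _, _, _)).2 = _
      rw [ih]
      refine Prod.ext ?_ (Prod.ext ?_ ?_)
      · show (if c ∈ "aeiou".toList then v + 1 else v) + pvVc t = v + pvVc (c :: t)
        simp only [pvVc, List.countP_cons]
        split_ifs <;> simp_all <;> push_cast <;> ring
      · show ((if p = c then true else d) || pvAdj _ (c :: t))
            = (d || pvAdj _ (p :: c :: t))
        rw [pvAdj_cons2]
        by_cases h : p = c
        · simp [h]
        · simp only [h, if_false]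
          cases d <;> simp [h]
      · show ((if String.ofList [p, c] ∈ pvBads then true else b) || pvAdj pvBadf (c :: t))
            = (b || pvAdj pvBadf (p :: c :: t))
        rw [pvAdj_cons2]
        by_cases h : String.ofList [p, c] ∈ pvBads <;>
          simp [h, pvBadf] <;> cases b <;> simp [Bool.or_comm, Bool.or_assoc]

-- A's vowel scan counts the same thing
theorem pv_vowels (cs : List Char) :
    ((cs.filter (fun c => decide (c ∈ pvVowels))).length : Int) = pvVc cs := by
  rw [pvVc, ← List.countP_eq_length_filter]
  rfl

-- A's index loop is the adjacent-equal-pair predicate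
theorem pv_dl (cs : List Char) (n k : Nat) (hn : cs.length - k = n) :
    pvDoubleLoop cs (PySem.List.pyRange (k : Int) ((cs.length : Int) - 1) 1)
      = pvAdj (fun x y => x == y) (cs.drop k) := by
  induction n generalizing k with
  | zero =>
      rw [PySem.List.pyRange_one_eq_nil (by omega)]
      rw [pvAdj_short _ _ (by simp; omega)]
      rfl
  | succ n ih =>
      by_cases hlt : (k : Int) < (cs.length : Int) - 1
      · have hk1 : k + 1 < cs.length := by omega
        have hk0 : k < cs.length := by omega
        have ek : ((k : Int) + 1) = ((k + 1 : Nat) : Int) := by push_cast; ring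
        have e1 : PySem.List.pyGet? cs (k : Int) = some cs[k] := by
          simp [List.getElem?_eq_getElem hk0]
        have e2 : PySem.List.pyGet? cs ((k + 1 : Nat) : Int) = some cs[k + 1] := by
          rw [PySem.List.pyGet?_natCast, List.getElem?_eq_getElem hk1]
        rw [PySem.List.pyRange_one_cons hlt, pvDoubleLoop, ek, e1, e2,
          ih (k + 1) (by omega),
          List.drop_eq_getElem_cons hk0, List.drop_eq_getElem_cons hk1, pvAdj_cons2]
        by_cases h : cs[k] = cs[k + 1]
        · simp [h]
        · simp [h]
      · rw [PySem.List.pyRange_one_eq_nil (by omega)]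
        rw [pvAdj_short _ _ (by simp; omega)]
        rfl

theorem pv_dl0 (cs : List Char) :
    pvDoubleLoop cs (PySem.List.pyRange 0 ((cs.length : Int) - 1) 1)
      = pvAdj (fun x y => x == y) cs := by
  have h := pv_dl cs cs.length 0 (by omega)
  simpa using h

theorem pv_infix_pair (a b : Char) (cs : List Char) :
    ([a, b] <:+: cs) ↔ pvAdj (fun x y => x == a && y == b) cs = true := by
  induction cs with
  | nil => simp [pvAdj]
  | cons c t ih =>
      cases t with
      | nil => simp [pvAdj, List.infix_cons_iff, List.cons_prefix_cons]
      | cons d t' =>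
          rw [List.infix_cons_iff, ih, pvAdj_cons2]
          simp only [List.cons_prefix_cons, List.nil_prefix, and_true,
            Bool.or_eq_true, Bool.and_eq_true, beq_iff_eq]
          constructor
          · rintro (⟨h1, h2⟩ | h)
            · exact Or.inl ⟨h1.symm, h2.symm⟩
            · exact Or.inr h
          · rintro (⟨h1, h2⟩ | h)
            · exact Or.inl ⟨h1.symm, h2.symm⟩
            · exact Or.inr h

-- pointwise reading of B's membership test
theorem pv_bad_pointwise (x y : Char) :
    pvBadf x y
      = ((x == 'a' && y == 'b') || (x == 'c' && y == 'd')
          || (x == 'p' && y == 'q') || (x == 'x' && y == 'y')) := by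
  rw [pvBadf, Bool.eq_iff_iff]
  simp [pvBads, String.ext_iff, String.toList_ofList]
  tauto

theorem pv_adj_congr (f g : Char → Char → Bool) (h : ∀ x y, f x y = g x y)
    (cs : List Char) : pvAdj f cs = pvAdj g cs := by
  induction cs with
  | nil => rfl
  | cons a t ih =>
      cases t with
      | nil => rfl
      | cons b t' => rw [pvAdj_cons2, pvAdj_cons2, h, ih]

theorem pv_adj_or (f g : Char → Char → Bool) (cs : List Char) :
    pvAdj (fun x y => f x y || g x y) cs = (pvAdj f cs || pvAdj g cs) := by
  induction cs with
  | nil => rfl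
  | cons a t ih =>
      cases t with
      | nil => rfl
      | cons b t' =>
          rw [pvAdj_cons2, pvAdj_cons2, pvAdj_cons2, ih]
          cases f a b <;> cases g a b <;> simp

theorem pv_isIn_adj (a b : Char) (line : String) :
    PySem.Str.isIn (String.ofList [a, b]) line
      = pvAdj (fun x y => x == a && y == b) line.toList := by
  by_cases h : [a, b] <:+: line.toList
  · rw [(pv_infix_pair a b line.toList).mp h]
    exact (PySem.Str.isIn_iff_infix _ _).mpr (by simpa [String.toList_ofList] using h)
  · have h2 : pvAdj (fun x y => x == a && y == b) line.toList = false := by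
      cases hx : pvAdj (fun x y => x == a && y == b) line.toList
      · rfl
      · exact absurd ((pv_infix_pair a b line.toList).mpr hx) h
    rw [h2]
    cases hy : PySem.Str.isIn (String.ofList [a, b]) line
    · rfl
    · exact absurd (show [a, b] <:+: line.toList by
        simpa [String.toList_ofList] using (PySem.Str.isIn_iff_infix _ _).mp hy) h

-- the whole-list reading of B's fold (empty list separately: no pair, no vowel)
theorem pv_fold_top (cs : List Char) :
    (cs.foldl pvStep (none, 0, false, false)).2
      = (pvVc cs, pvAdj (fun x y => x == y) cs, pvAdj pvBadf cs) := by
  cases cs with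
  | nil => simp [pvVc, pvAdj]
  | cons c t =>
      rw [List.foldl_cons]
      show (t.foldl pvStep (some c, _, _, _)).2 = _
      rw [pv_fold]
      refine Prod.ext ?_ (Prod.ext ?_ ?_)
      · show (if c ∈ "aeiou".toList then (0 : Int) + 1 else 0) + pvVc t = pvVc (c :: t)
        simp only [pvVc, List.countP_cons]
        split_ifs <;> simp_all <;> push_cast <;> ring
      · simp
      · simp

-- ===== VERDICT (by name: the statement is the Claim_ definition above) =====
theorem is_nice_spec : Claim_equal_is_nice := by
  intro line _
  unfold Spec_is_nice is_nice is_nice_alt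
  dsimp only
  rw [pv_fold_top, pv_vowels, pv_dl0]
  rw [pv_adj_congr pvBadf
      (fun x y => ((x == 'a' && y == 'b') || (x == 'c' && y == 'd')
          || (x == 'p' && y == 'q') || (x == 'x' && y == 'y')))
      pv_bad_pointwise]
  rw [pv_adj_or, pv_adj_or, pv_adj_or]
  simp only [pvBads, pvBadsLoop]
  rw [show ("ab" : String) = String.ofList ['a', 'b'] from rfl,
      show ("cd" : String) = String.ofList ['c', 'd'] from rfl,
      show ("pq" : String) = String.ofList ['p', 'q'] from rfl,
      show ("xy" : String) = String.ofList ['x', 'y'] from rfl]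
  rw [pv_isIn_adj, pv_isIn_adj, pv_isIn_adj, pv_isIn_adj]
  set v := pvVc line.toList
  set dd := pvAdj (fun x y => x == y) line.toList
  set b1 := pvAdj (fun x y => x == 'a' && y == 'b') line.toList
  set b2 := pvAdj (fun x y => x == 'c' && y == 'd') line.toList
  set b3 := pvAdj (fun x y => x == 'p' && y == 'q') line.toList
  set b4 := pvAdj (fun x y => x == 'x' && y == 'y') line.toList
  cases dd <;> cases b1 <;> cases b2 <;> cases b3 <;> cases b4 <;>
    by_cases hv : v < 3 <;> simp_all
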